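-- pv_equiv track=rewrite | github.com/Dinusha2017/aqpms_diagram_marking_py | LogicGateSimulation.py | getInputForXorXnor
-- ===== SOURCE A (Python) =====
-- def getInputForXorXnor(currentNodeInfo,
--                        curInput,
--                        breakInput):
--     inputs = currentNodeInfo[0]['node']['inputs']
--
--     currentInput = curInput
--
--     zeroFound = "false"
--     oneFound = "false"
--
--     for binaryNum in inputs:
--         if binaryNum == 1:
--             oneFound = "true"
--         elif binaryNum == 0:
--             zeroFound = "true"
--
--         if oneFound == "true" and zeroFound == "true":
--             currentInput = breakInput
--             break
--
--     return currentInput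
-- ===== SOURCE B (Python) =====
-- def getInputForXorXnor(currentNodeInfo,
--                        curInput,
--                        breakInput):
--     inputs = currentNodeInfo[0]['node']['inputs']
--     if 1 in inputs and 0 in inputs:
--         return breakInput
--     return curInput
-- ===== Notes on version B (the rewrite author's own statement) =====
-- stated objective: simpler
-- what changed: The explicit loop with two string flags and a break is replaced by two short-circuited membership tests (1 in inputs and 0 in inputs) and a single conditional return.
import Mathlib
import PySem

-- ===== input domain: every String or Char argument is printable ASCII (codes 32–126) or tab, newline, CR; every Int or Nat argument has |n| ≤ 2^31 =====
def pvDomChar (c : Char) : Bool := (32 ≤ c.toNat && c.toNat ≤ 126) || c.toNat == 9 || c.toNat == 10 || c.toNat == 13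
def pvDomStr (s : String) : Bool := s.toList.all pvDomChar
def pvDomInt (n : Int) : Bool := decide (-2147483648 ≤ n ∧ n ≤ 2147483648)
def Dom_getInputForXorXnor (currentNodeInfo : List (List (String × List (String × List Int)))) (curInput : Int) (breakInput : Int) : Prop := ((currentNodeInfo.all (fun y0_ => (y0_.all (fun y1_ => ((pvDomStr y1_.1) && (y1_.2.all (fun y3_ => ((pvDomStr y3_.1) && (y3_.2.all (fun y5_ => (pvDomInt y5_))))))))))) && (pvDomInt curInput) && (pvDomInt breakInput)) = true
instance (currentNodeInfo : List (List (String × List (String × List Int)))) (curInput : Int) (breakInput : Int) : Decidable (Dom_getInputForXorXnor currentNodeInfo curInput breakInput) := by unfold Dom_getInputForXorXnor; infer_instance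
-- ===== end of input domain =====

-- B replaces A's flag-tracking loop with two membership tests; objective: simpler.

-- shared dict-indexing helper: first-match lookup in an association list (Python d[k])
def pvLookup? {ν : Type} (l : List (String × ν)) (k : String) : Option ν :=
  (l.find? (fun p => p.1 == k)).map (·.2)

-- currentNodeInfo[0]['node']['inputs'] (defaults used only outside Pre_, where Python raises)
def pvInputsOf (currentNodeInfo : List (List (String × List (String × List Int)))) : List Int :=
  ((pvLookup? (currentNodeInfo.headD []) "node").bind (fun nd => pvLookup? nd "inputs")).getD []

-- ===== PORT A =====
-- the for-loop with its two string flags and break, as structural recursion over inputs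
def pvLoopA : List Int → Int → Int → String → String → Int
  | [], currentInput, _, _, _ => currentInput
  | b :: rest, currentInput, breakInput, oneFound, zeroFound =>
    let oneFound' := if b = 1 then "true" else oneFound
    let zeroFound' := if b = 1 then zeroFound else if b = 0 then "true" else zeroFound
    if oneFound' = "true" ∧ zeroFound' = "true" then breakInput
    else pvLoopA rest currentInput breakInput oneFound' zeroFound'

def getInputForXorXnor (currentNodeInfo : List (List (String × List (String × List Int)))) (curInput : Int) (breakInput : Int) : Int :=
  pvLoopA (pvInputsOf currentNodeInfo) curInput breakInput "false" "false"

-- ===== PORT B =====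
def getInputForXorXnor_alt (currentNodeInfo : List (List (String × List (String × List Int)))) (curInput : Int) (breakInput : Int) : Int :=
  let inputs := pvInputsOf currentNodeInfo
  if inputs.contains 1 && inputs.contains 0 then breakInput else curInput

-- ===== PRECONDITION & SPEC =====
-- Pre_ excludes exactly the inputs on which A raises: empty currentNodeInfo (IndexError) or a
-- missing 'node'/'inputs' key (KeyError).
def Pre_getInputForXorXnor (currentNodeInfo : List (List (String × List (String × List Int)))) (curInput : Int) (breakInput : Int) : Prop :=
  currentNodeInfo ≠ [] ∧ ((pvLookup? (currentNodeInfo.headD []) "node").bind (fun nd => pvLookup? nd "inputs")).isSome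
instance (currentNodeInfo : List (List (String × List (String × List Int)))) (curInput : Int) (breakInput : Int) : Decidable (Pre_getInputForXorXnor currentNodeInfo curInput breakInput) := by unfold Pre_getInputForXorXnor; infer_instance

def pvWitness_getInputForXorXnor : (List (List (String × List (String × List Int)))) × Int × Int :=
  ([[("node", [("inputs", [1, 0])])]], 5, 9)

def Spec_getInputForXorXnor (currentNodeInfo : List (List (String × List (String × List Int)))) (curInput : Int) (breakInput : Int) (out : Int) : Prop := out = getInputForXorXnor_alt currentNodeInfo curInput breakInput
instance (currentNodeInfo : List (List (String × List (String × List Int)))) (curInput : Int) (breakInput : Int) (out : Int) : Decidable (Spec_getInputForXorXnor currentNodeInfo curInput breakInput out) := by unfold Spec_getInputForXorXnor; infer_instance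

-- ===== CLAIM (what is proved, stated in full; the proofs are below) =====
def Claim_equal_getInputForXorXnor : Prop := ∀ (currentNodeInfo : List (List (String × List (String × List Int)))) (curInput : Int) (breakInput : Int), Dom_getInputForXorXnor currentNodeInfo curInput breakInput → Pre_getInputForXorXnor currentNodeInfo curInput breakInput → Spec_getInputForXorXnor currentNodeInfo curInput breakInput (getInputForXorXnor currentNodeInfo curInput breakInput)

-- ===== LEMMAS AND PROOFS =====
-- loop invariant: as long as the flags are not both "true" on entry, the loop returns
-- breakInput iff the remaining inputs complete {0,1} together with the flags.
theorem pvLoopA_eq (inputs : List Int) (cur brk : Int) (oneF zeroF : String)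
    (h : ¬(oneF = "true" ∧ zeroF = "true")) :
    pvLoopA inputs cur brk oneF zeroF =
      if (oneF = "true" ∨ (1 : Int) ∈ inputs) ∧ (zeroF = "true" ∨ (0 : Int) ∈ inputs)
      then brk else cur := by
  induction inputs generalizing oneF zeroF with
  | nil => simp [pvLoopA]; tauto
  | cons b rest ih =>
    by_cases hb1 : b = 1
    · subst hb1
      by_cases hz : zeroF = "true"
      · simp [pvLoopA, hz]
      · simp only [pvLoopA]
        norm_num [hz]
        rw [ih "true" zeroF (by simp [hz])]
        simp [hz]
    · by_cases hb0 : b = 0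
      · subst hb0
        by_cases ho : oneF = "true"
        · simp [pvLoopA, ho]
        · simp only [pvLoopA]
          norm_num [ho]
          rw [ih oneF "true" (by simp [ho])]
          simp [ho]
      · simp only [pvLoopA]
        norm_num [hb1, hb0, h]
        rw [ih oneF zeroF h]
        simp [Ne.symm hb1, Ne.symm hb0]

-- ===== VERDICT (by name: the statement is the Claim_ definition above) =====
theorem getInputForXorXnor_spec : Claim_equal_getInputForXorXnor := by
  intro cni cur brk _ _
  unfold Spec_getInputForXorXnor getInputForXorXnor getInputForXorXnor_alt
  rw [pvLoopA_eq _ _ _ _ _ (by simp)]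
  simp
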